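-- pv_equiv track=rewrite | github.com/yaoxingyu0405/2022A_USTC_YXY_CPA | homework/hw_1-5/1-5题源代码.py | sch_random
-- ===== SOURCE A (Python) =====
-- def sch_random(N, M = 1, a = 16807, b = 0, m = 2**31 - 1, seed = 1):#N为生成个数，M为生成间隔
--     q, r = m // a, m % a    #得到p，r
--     for i in range(N):
--         for j in range(M):
--             seed = a * (seed % q) -r * (seed // q) #进行schrage方法
--             if seed < 0:
--                 seed += m
--         yield seed  #产生可迭代对象，简化代码
-- ===== SOURCE B (Python) =====
-- def sch_random(N, M = 1, a = 16807, b = 0, m = 2**31 - 1, seed = 1):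
--     # Cycle-detecting reimplementation: memoize the orbit of the Schrage step in
--     # a dict; once the orbit repeats, every remaining output is read off by
--     # modular indexing into the recorded orbit instead of stepping further.
--     q, r = m // a, m % a
--     steps = M if M > 0 else 0
--     total = N * steps if N > 0 else 0
--     orbit = [seed]
--     pos = {seed: 0}
--     start = None
--     while len(orbit) <= total:
--         s = orbit[-1]
--         s = a * (s % q) - r * (s // q)
--         if s < 0:
--             s += m
--         if s in pos:
--             start = pos[s]
--             break
--         pos[s] = len(orbit)
--         orbit.append(s)
--     lam = len(orbit) - start if start is not None else 1
--     for i in range(1, N + 1):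
--         k = i * steps
--         idx = k if k < len(orbit) else start + (k - start) % lam
--         yield orbit[idx]
-- ===== Notes on version B (the rewrite author's own statement) =====
-- stated objective: alternative
-- what changed: B replaces A's blind N*M-step simulation by cycle detection: it memoizes the orbit of the Schrage step in a dict keyed by seed value, stops stepping at the first repeated seed, and reads every remaining output off by modular indexing into the recorded orbit.
import Mathlib
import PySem

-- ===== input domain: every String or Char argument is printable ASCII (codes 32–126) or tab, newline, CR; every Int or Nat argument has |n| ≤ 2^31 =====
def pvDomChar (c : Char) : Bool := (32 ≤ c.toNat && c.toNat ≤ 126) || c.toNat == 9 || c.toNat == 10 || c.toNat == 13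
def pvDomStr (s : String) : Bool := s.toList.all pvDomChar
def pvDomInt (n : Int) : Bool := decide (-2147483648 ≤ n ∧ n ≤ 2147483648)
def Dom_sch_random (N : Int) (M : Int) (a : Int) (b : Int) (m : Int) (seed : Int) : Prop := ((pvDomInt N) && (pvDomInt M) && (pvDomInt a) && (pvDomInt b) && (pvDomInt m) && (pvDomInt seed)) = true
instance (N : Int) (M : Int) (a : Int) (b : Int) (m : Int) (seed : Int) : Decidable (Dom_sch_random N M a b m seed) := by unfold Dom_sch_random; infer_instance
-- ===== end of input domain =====

-- B replaces A's blind N×M stepping by cycle detection: it memoizes the orbit of the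
-- Schrage step in a dict and, once the orbit repeats, reads all remaining outputs off
-- by modular indexing into the recorded orbit (objective: alternative).

-- ===== PORT A =====
def sch_random (N : Int) (M : Int) (a : Int) (b : Int) (m : Int) (seed : Int) : List Int :=
  let q := PySem.Int.floordiv m a
  let r := PySem.Int.mod m a
  ((PySem.List.pyRange 0 N 1).foldl (fun (st : Int × List Int) _ =>
      let s := (PySem.List.pyRange 0 M 1).foldl (fun s _ =>
        let s' := a * (PySem.Int.mod s q) - r * (PySem.Int.floordiv s q)
        if s' < 0 then s' + m else s') st.1
      (s, st.2 ++ [s])) (seed, [])).2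

-- ===== PORT B =====
-- the while loop of Source B: grow the orbit while len(orbit) <= total, stopping early at
-- the first repeated seed (fuel = total + 1 - len(orbit), so fuel > 0 ↔ the while test)
def pvGrow (f : Int → Int) : Nat → List Int → PySem.Dict Int Int → (List Int × Option Int)
  | 0, orbit, _ => (orbit, none)
  | fuel + 1, orbit, pos =>
      let s := f (orbit.getD (orbit.length - 1) 0)   -- orbit[-1]; orbit is never empty
      match PySem.Dict.get? pos s with
      | some i => (orbit, some i)
      | none => pvGrow f fuel (orbit ++ [s]) (PySem.Dict.insert pos s (orbit.length : Int))

def sch_random_alt (N : Int) (M : Int) (a : Int) (b : Int) (m : Int) (seed : Int) : List Int :=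
  let q := PySem.Int.floordiv m a
  let r := PySem.Int.mod m a
  let f := fun s : Int =>
    let s' := a * (PySem.Int.mod s q) - r * (PySem.Int.floordiv s q)
    if s' < 0 then s' + m else s'
  let steps : Int := if 0 < M then M else 0
  let total : Int := if 0 < N then N * steps else 0
  let res := pvGrow f total.toNat [seed] (PySem.Dict.insert PySem.Dict.empty seed 0)
  let orbit := res.1
  let lam : Int := match res.2 with | some st => (orbit.length : Int) - st | none => 1
  (PySem.List.pyRange 1 (N + 1) 1).map (fun i =>
    let k := i * steps
    let idx : Int := if k < (orbit.length : Int) then k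
      else match res.2 with
        | some st => st + PySem.Int.mod (k - st) lam
        | none => k   -- unreachable: with no cycle found the orbit covers every k ≤ total
    orbit.getD idx.toNat 0)   -- exact: idx is ≥ 0 and < len(orbit) on every admitted input

-- ===== PRECONDITION & SPEC =====
-- Pre_ excludes exactly the inputs on which the Python A raises ZeroDivisionError:
-- a = 0 (computing m // a), or m // a = 0 while both loops actually run (seed // q with q = 0).
def Pre_sch_random (N : Int) (M : Int) (a : Int) (b : Int) (m : Int) (seed : Int) : Prop :=
  a ≠ 0 ∧ (PySem.Int.floordiv m a ≠ 0 ∨ N ≤ 0 ∨ M ≤ 0)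
instance (N : Int) (M : Int) (a : Int) (b : Int) (m : Int) (seed : Int) : Decidable (Pre_sch_random N M a b m seed) := by unfold Pre_sch_random; infer_instance
def pvWitness_sch_random : Int × Int × Int × Int × Int × Int := (3, 2, 16807, 0, 2147483647, 1)

def Spec_sch_random (N : Int) (M : Int) (a : Int) (b : Int) (m : Int) (seed : Int) (out : List Int) : Prop := out = sch_random_alt N M a b m seed
instance (N : Int) (M : Int) (a : Int) (b : Int) (m : Int) (seed : Int) (out : List Int) : Decidable (Spec_sch_random N M a b m seed out) := by unfold Spec_sch_random; infer_instance

-- ===== CLAIM (what is proved, stated in full; the proofs are below) =====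
def Claim_equal_sch_random : Prop := ∀ (N : Int) (M : Int) (a : Int) (b : Int) (m : Int) (seed : Int), Dom_sch_random N M a b m seed → Pre_sch_random N M a b m seed → Spec_sch_random N M a b m seed (sch_random N M a b m seed)

-- ===== LEMMAS AND PROOFS =====

-- A's side: the reference output list — n values, each μ steps of f after the previous
def pvOuts (f : Int → Int) (μ : Nat) : Nat → Int → List Int
  | 0, _ => []
  | n + 1, s => f^[μ] s :: pvOuts f μ n (f^[μ] s)

theorem pvOuts_snoc (f : Int → Int) (μ n : Nat) (s : Int) :
    pvOuts f μ (n + 1) s = pvOuts f μ n s ++ [f^[(n + 1) * μ] s] := by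
  induction n generalizing s with
  | zero => simp [pvOuts, one_mul]
  | succ k ih =>
      rw [pvOuts, ih, pvOuts, ← List.cons_append]
      have : f^[(k + 1) * μ] (f^[μ] s) = f^[(k + 1 + 1) * μ] s := by
        rw [← Function.iterate_add_apply, (by ring : (k + 1) * μ + μ = (k + 1 + 1) * μ)]
      rw [this]

theorem pvFoldl_const_iterate {β : Type} (f : Int → Int) (l : List β) (s : Int) :
    l.foldl (fun x _ => f x) s = f^[l.length] s := by
  induction l generalizing s with
  | nil => rfl
  | cons y ys ih => simp [List.foldl_cons, ih, Function.iterate_succ_apply]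

-- A's outer fold produces pvOuts
theorem pvA_fold (f : Int → Int) (μ n : Nat) (s : Int) (acc : List Int) :
    (PySem.List.pyRange 0 (n : Int) 1).foldl (fun (st : Int × List Int) _ =>
        (f^[μ] st.1, st.2 ++ [f^[μ] st.1])) (s, acc) =
      (f^[n * μ] s, acc ++ pvOuts f μ n s) := by
  induction n generalizing acc with
  | zero => simp [PySem.List.pyRange_one_eq_nil, pvOuts]
  | succ k ih =>
      have hc : (((k + 1 : Nat)) : Int) = (k : Int) + 1 := by push_cast; ring
      rw [hc, PySem.List.pyRange_one_succ_right (by positivity : (0 : Int) ≤ (k : Int)),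
        List.foldl_append, ih]
      simp only [List.foldl_cons, List.foldl_nil]
      rw [← Function.iterate_add_apply, pvOuts_snoc,
        (by ring : μ + k * μ = (k + 1) * μ), List.append_assoc]

-- pvOuts as a map over the 1-based output indices
theorem pvOuts_eq_map (f : Int → Int) (μ n : Nat) (s : Int) :
    pvOuts f μ n s = (PySem.List.pyRange 1 ((n : Int) + 1) 1).map (fun i => f^[i.toNat * μ] s) := by
  induction n with
  | zero => simp [pvOuts, PySem.List.pyRange_one_eq_nil]
  | succ k ih =>
      have hc : (((k + 1 : Nat)) : Int) + 1 = ((k : Int) + 1) + 1 := by push_cast; ring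
      rw [pvOuts_snoc, ih, hc,
        PySem.List.pyRange_one_succ_right (by omega : (1 : Int) ≤ (k : Int) + 1),
        List.map_append]
      simp only [List.map_cons, List.map_nil]
      have ht : (((k : Int) + 1)).toNat = k + 1 := by omega
      rw [ht]

-- getD on a range-map orbit
theorem pvOrbit_getD (f : Int → Int) (s : Int) (L j : Nat) (hj : j < L) :
    ((List.range L).map (fun i => f^[i] s)).getD j 0 = f^[j] s := by
  rw [List.getD_eq_getElem?_getD, List.getElem?_map, List.getElem?_range hj]
  rfl

-- the cycle-jump lemma
theorem pvCycle (f : Int → Int) (s : Int) (μ lam : Nat) (hlam : 0 < lam)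
    (h : f^[μ + lam] s = f^[μ] s) (t : Nat) : f^[μ + t] s = f^[μ + t % lam] s := by
  induction t using Nat.strong_induction_on with
  | _ t ih =>
    by_cases ht : t < lam
    · rw [Nat.mod_eq_of_lt ht]
    · rw [not_lt] at ht
      have h1 : f^[μ + t] s = f^[μ + (t - lam)] s := by
        have he : μ + t = (t - lam) + (μ + lam) := by omega
        rw [he, Function.iterate_add_apply, h, ← Function.iterate_add_apply]
        congr 1; omega
      rw [h1, ih (t - lam) (by omega), Nat.mod_eq_sub_mod ht]

-- the dict invariant used by pvGrow_spec
def pvPosInv (f : Int → Int) (s0 : Int) (L : Nat) (pos : PySem.Dict Int Int) : Prop :=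
  ∀ v i, PySem.Dict.get? pos v = some i → 0 ≤ i ∧ i.toNat < L ∧ f^[i.toNat] s0 = v

-- pvGrow's loop invariant: the orbit is the first L iterates of f; it either runs out of
-- fuel with no repeat, or stops at a repeat f^[L'] s0 = f^[st] s0 with st < L'
theorem pvGrow_spec (f : Int → Int) (s0 : Int) (fuel : Nat) :
    ∀ (L : Nat) (orbit : List Int) (pos : PySem.Dict Int Int),
    orbit = (List.range L).map (fun i => f^[i] s0) → 0 < L →
    pvPosInv f s0 L pos →
    ∃ L', (pvGrow f fuel orbit pos).1 = (List.range L').map (fun i => f^[i] s0) ∧ L ≤ L' ∧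
      (match (pvGrow f fuel orbit pos).2 with
       | none => L' = L + fuel
       | some st => 0 ≤ st ∧ st.toNat < L' ∧ f^[L'] s0 = f^[st.toNat] s0) := by
  induction fuel with
  | zero =>
      intro L orbit pos horb hL hinv
      exact ⟨L, by simp [pvGrow, horb]⟩
  | succ fuel ih =>
      intro L orbit pos horb hL hinv
      have hlast : orbit.getD (orbit.length - 1) 0 = f^[L - 1] s0 := by
        rw [horb]; simp only [List.length_map, List.length_range]
        exact pvOrbit_getD f s0 L (L - 1) (by omega)
      have hs : f (orbit.getD (orbit.length - 1) 0) = f^[L] s0 := by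
        rw [hlast, ← Function.iterate_succ_apply' f (L - 1) s0]
        congr 1; omega
      rw [pvGrow]
      simp only [hs]
      cases hget : PySem.Dict.get? pos (f^[L] s0) with
      | some i =>
          obtain ⟨h0, hlt, hv⟩ := hinv _ _ hget
          exact ⟨L, by simp [horb], le_refl L, h0, hlt, hv.symm⟩
      | none =>
          have horb' : orbit ++ [f^[L] s0] = (List.range (L + 1)).map (fun i => f^[i] s0) := by
            rw [horb, List.range_succ, List.map_append]; rfl
          have hlen : (orbit.length : Int) = (L : Int) := by
            rw [horb]; simp
          have hinv' : pvPosInv f s0 (L + 1) (PySem.Dict.insert pos (f^[L] s0) (orbit.length : Int)) := by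
            intro v i hvi
            rw [PySem.Dict.get?_insert] at hvi
            split_ifs at hvi with hv
            · obtain rfl : (orbit.length : Int) = i := by injection hvi
              subst hv
              refine ⟨by omega, ?_, ?_⟩
              · rw [hlen]; omega
              · rw [hlen, Int.toNat_natCast]
            · obtain ⟨h0, hlt, hval⟩ := hinv _ _ hvi
              exact ⟨h0, by omega, hval⟩
          obtain ⟨L', hOrb, hLe, hRest⟩ := ih (L + 1) (orbit ++ [f^[L] s0]) _ horb' (by omega) hinv'
          refine ⟨L', hOrb, by omega, ?_⟩
          cases hres : (pvGrow f fuel (orbit ++ [f^[L] s0]) (PySem.Dict.insert pos (f^[L] s0) (orbit.length : Int))).2 with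
          | none => rw [hres] at hRest; omega
          | some st => rw [hres] at hRest; exact hRest

-- ===== VERDICT (by name: the statement is the Claim_ definition above) =====
theorem sch_random_spec : Claim_equal_sch_random := by
  intro N M a b m seed _ _
  unfold Spec_sch_random sch_random sch_random_alt
  simp only []
  set q := PySem.Int.floordiv m a with hq
  set r := PySem.Int.mod m a with hr
  set F : Int → Int := fun s =>
    let s' := a * (PySem.Int.mod s q) - r * (PySem.Int.floordiv s q)
    if s' < 0 then s' + m else s' with hF
  set μ := M.toNat with hμ
  -- A's inner fold is F iterated μ times
  have hinner : ∀ s : Int, (PySem.List.pyRange 0 M 1).foldl (fun s _ =>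
      let s' := a * (PySem.Int.mod s q) - r * (PySem.Int.floordiv s q)
      if s' < 0 then s' + m else s') s = F^[μ] s := by
    intro s
    rw [pvFoldl_const_iterate (fun s =>
      let s' := a * (PySem.Int.mod s q) - r * (PySem.Int.floordiv s q)
      if s' < 0 then s' + m else s')]
    rw [PySem.List.length_pyRange_one, Int.sub_zero]
  have hAfun : (fun (st : Int × List Int) (_ : Int) =>
      let s := (PySem.List.pyRange 0 M 1).foldl (fun s _ =>
        let s' := a * (PySem.Int.mod s q) - r * (PySem.Int.floordiv s q)
        if s' < 0 then s' + m else s') st.1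
      (s, st.2 ++ [s])) = fun (st : Int × List Int) _ =>
        (F^[μ] st.1, st.2 ++ [F^[μ] st.1]) := by
    funext st x
    simp only [hinner]
  rw [hAfun]
  have hst : (if 0 < M then M else 0) = ((μ : Nat) : Int) := by
    rw [hμ]; split_ifs <;> omega
  rw [hst]
  rcases le_or_gt N 0 with hN | hN
  · rw [PySem.List.pyRange_one_eq_nil hN,
      PySem.List.pyRange_one_eq_nil (show N + 1 ≤ 1 by omega)]
    rfl
  · set n := N.toNat with hn
    have hNn : N = ((n : Nat) : Int) := by omega
    rw [if_pos hN]
    have htot : (N * ((μ : Nat) : Int)).toNat = n * μ := by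
      rw [hNn]; omega
    rw [htot]
    -- the orbit produced by pvGrow
    have hinv1 : pvPosInv F seed 1 (PySem.Dict.insert PySem.Dict.empty seed 0) := by
      intro v j h
      rw [PySem.Dict.get?_insert] at h
      split_ifs at h with hv
      · obtain rfl : (0 : Int) = j := by injection h
        exact ⟨le_refl 0, by omega, by simp [hv]⟩
      · rw [PySem.Dict.get?_empty] at h; exact absurd h (by simp)
    obtain ⟨L', hOrb, hL1, hRest⟩ := pvGrow_spec F seed (n * μ) 1 [seed]
      (PySem.Dict.insert PySem.Dict.empty seed 0) (by simp) (by omega) hinv1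
    -- A's fold gives pvOuts; rewrite it as a map over the same range
    conv_lhs => rw [hNn]
    rw [pvA_fold F μ n seed []]
    simp only [List.nil_append]
    rw [pvOuts_eq_map, ← hNn]
    -- elementwise comparison
    refine List.map_congr_left ?_
    intro i hi
    rw [PySem.List.mem_pyRange_one] at hi
    obtain ⟨hi1, hi2⟩ := hi
    set kn := i.toNat * μ with hkn
    have hk : i * ((μ : Nat) : Int) = ((kn : Nat) : Int) := by
      rw [hkn]; push_cast; rw [Int.toNat_of_nonneg (by omega : (0:Int) ≤ i)]
    have hkT : kn ≤ n * μ := by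
      have : i.toNat ≤ n := by omega
      exact Nat.mul_le_mul_right μ this
    have hlen : (((pvGrow F (n * μ) [seed] (PySem.Dict.insert PySem.Dict.empty seed 0)).1).length : Int)
        = ((L' : Nat) : Int) := by
      rw [hOrb]; simp
    cases hres : (pvGrow F (n * μ) [seed] (PySem.Dict.insert PySem.Dict.empty seed 0)).2 with
    | none =>
        rw [hres] at hRest
        have hL'eq : L' = 1 + n * μ := hRest
        have hklt : kn < L' := by omega
        rw [hlen, hk, if_pos (by exact_mod_cast hklt), Int.toNat_natCast, hOrb,
          pvOrbit_getD F seed L' kn hklt]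
    | some st =>
        rw [hres] at hRest
        obtain ⟨hst0, hstL, hcyc⟩ := (hRest : 0 ≤ st ∧ st.toNat < L' ∧ F^[L'] seed = F^[st.toNat] seed)
        rw [hlen, hk]
        by_cases hlt : ((kn : Nat) : Int) < ((L' : Nat) : Int)
        · have hklt : kn < L' := by exact_mod_cast hlt
          rw [if_pos hlt, Int.toNat_natCast, hOrb, pvOrbit_getD F seed L' kn hklt]
        · rw [if_neg hlt]
          have hkL : L' ≤ kn := by omega
          set sn := st.toNat with hsn
          have hstc : st = ((sn : Nat) : Int) := by omega
          set lamn := L' - sn with hlamn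
          have hlam : 0 < lamn := by omega
          show F^[kn] seed = (pvGrow F (n * μ) [seed]
              (PySem.Dict.insert PySem.Dict.empty seed 0)).1.getD
            (st + PySem.Int.mod (((kn : Nat) : Int) - st) (((L' : Nat) : Int) - st)).toNat 0
          have h1 : ((kn : Nat) : Int) - st = (((kn - sn : Nat)) : Int) := by omega
          have h2 : ((L' : Nat) : Int) - st = (((lamn : Nat)) : Int) := by omega
          rw [h1, h2, PySem.Int.mod_natCast]
          have hidx : (st + (((kn - sn) % lamn : Nat) : Int)).toNat = sn + (kn - sn) % lamn := by
            omega
          have hidxlt : sn + (kn - sn) % lamn < L' := by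
            have := Nat.mod_lt (kn - sn) hlam
            omega
          rw [hidx, hOrb, pvOrbit_getD F seed L' _ hidxlt]
          have hcyc' : F^[sn + lamn] seed = F^[sn] seed := by
            have : sn + lamn = L' := by omega
            rw [this, hcyc]
          have := pvCycle F seed sn lamn hlam hcyc' (kn - sn)
          have hkeq : sn + (kn - sn) = kn := by omega
          rw [hkeq] at this
          exact this
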